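-- pv_equiv track=rewrite | github.com/theofanistzoumakas/social-network-analysis | main.py | Spa
-- ===== SOURCE A (Python) =====
-- def Spa(matrices):
--     Spa_all = []
--     for i in matrices:
--         Spa_all.append([])
--         for node1 in range(len(i)):
--             rows = []
--             for node2 in range(len(i)):
--                 rows.append(0)
--             Spa_all[-1].append(rows)
--
--         for node1 in range(len(i)):
--             for node2 in range(len(i)):
--                 if node1 == node2:
--                     continue
--                 counter1 = sum(i[node1])
--                 counter2 = sum(i[node2])
--                 Spa_all[-1][node1][node2] = counter1 * counter2
--                 Spa_all[-1][node2][node1] = counter1 * counter2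
--     return Spa_all
-- ===== SOURCE B (Python) =====
-- def Spa(matrices):
--     out = []
--     for m in matrices:
--         n = len(m)
--         s = [sum(row) for row in m]
--         out.append([[0 if a == b else s[a] * s[b] for b in range(n)]
--                     for a in range(n)])
--     return out
-- ===== Notes on version B (the rewrite author's own statement) =====
-- stated objective: faster
-- what changed: Row sums are computed once per matrix and the table is filled directly by a comprehension (diagonal 0, product elsewhere), instead of re-summing both rows inside a doubly nested loop that mutates a pre-built zero table with symmetric writes.
import Mathlib
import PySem

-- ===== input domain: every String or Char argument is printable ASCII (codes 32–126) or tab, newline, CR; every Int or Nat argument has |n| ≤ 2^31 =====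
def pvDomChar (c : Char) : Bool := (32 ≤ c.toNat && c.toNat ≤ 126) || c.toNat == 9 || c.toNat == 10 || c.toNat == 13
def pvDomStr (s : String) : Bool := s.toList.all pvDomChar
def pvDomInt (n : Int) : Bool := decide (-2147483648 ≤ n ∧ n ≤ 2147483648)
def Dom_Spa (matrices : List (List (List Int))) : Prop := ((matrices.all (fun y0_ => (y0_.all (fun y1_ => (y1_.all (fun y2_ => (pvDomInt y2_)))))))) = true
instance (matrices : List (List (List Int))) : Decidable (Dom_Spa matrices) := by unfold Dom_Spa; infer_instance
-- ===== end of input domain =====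

-- B precomputes the row sums once per matrix and fills the table directly
-- (faster in a timing run: A re-sums both rows inside the doubly nested loop).

-- ===== PORT A =====
-- sum(i[a]) — index a is always in range (a < len(i)) where A uses it
def pvRowSum (i : List (List Int)) (a : Nat) : Int := (i.getD a []).sum
-- Python 't[a][b] = v' on a list of lists, a and b in range where A uses it
def pvSetCell (t : List (List Int)) (a b : Nat) (v : Int) : List (List Int) :=
  t.modify a (fun row => row.set b v)
-- A's per-matrix body: build the n×n zero table, then the two nested index loops
def pvSpaOne (i : List (List Int)) : List (List Int) :=
  let n := i.length
  let init := (List.range n).map (fun _ => (List.range n).map (fun _ => (0 : Int)))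
  (List.range n).foldl (fun t node1 =>
    (List.range n).foldl (fun t node2 =>
      if node1 = node2 then t
      else
        let c1 := pvRowSum i node1
        let c2 := pvRowSum i node2
        pvSetCell (pvSetCell t node1 node2 (c1 * c2)) node2 node1 (c1 * c2)) t) init

def Spa (matrices : List (List (List Int))) : List (List (List Int)) :=
  matrices.foldl (fun acc i => acc ++ [pvSpaOne i]) []

-- ===== PORT B =====
def pvSpaAltOne (m : List (List Int)) : List (List Int) :=
  let n := m.length
  let s := m.map List.sum
  (List.range n).map (fun a => (List.range n).map (fun b =>
    if a = b then 0 else s.getD a 0 * s.getD b 0))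

def Spa_alt (matrices : List (List (List Int))) : List (List (List Int)) :=
  matrices.map pvSpaAltOne

-- ===== PRECONDITION & SPEC =====
def Spec_Spa (matrices : List (List (List Int))) (out : List (List (List Int))) : Prop := out = Spa_alt matrices
instance (matrices : List (List (List Int))) (out : List (List (List Int))) : Decidable (Spec_Spa matrices out) := by unfold Spec_Spa; infer_instance

-- ===== CLAIM (what is proved, stated in full; the proofs are below) =====
def Claim_equal_Spa : Prop := ∀ (matrices : List (List (List Int))), Dom_Spa matrices → Spec_Spa matrices (Spa matrices)

-- ===== LEMMAS AND PROOFS =====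

-- the intended table entry
def pvEnt (i : List (List Int)) (a b : Nat) : Int :=
  if a = b then 0 else pvRowSum i a * pvRowSum i b

-- read cell (a,b) of a table
def pvGet2 (t : List (List Int)) (a b : Nat) : Int := (t.getD a []).getD b 0

-- shape: n rows, each of length n
def pvShape (n : Nat) (t : List (List Int)) : Prop :=
  t.length = n ∧ ∀ (j : Nat) (hj : j < t.length), (t[j]'hj).length = n

theorem pvShape_setCell {n : Nat} {t : List (List Int)} (h : pvShape n t)
    (a b : Nat) (v : Int) : pvShape n (pvSetCell t a b v) := by
  obtain ⟨h1, h2⟩ := h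
  refine ⟨by simpa [pvSetCell] using h1, ?_⟩
  intro j hj
  have hj' : j < t.length := by simpa [pvSetCell] using hj
  simp only [pvSetCell]
  rw [List.getElem_modify]
  split
  · simpa using h2 j hj'
  · exact h2 j hj'

theorem pvGetD_eq {α : Type} {t : List α} {a : Nat} {d : α} (h : a < t.length) :
    t.getD a d = t[a]'h := by
  simp [List.getD_eq_getElem?_getD, List.getElem?_eq_getElem h]

theorem pvGet2_setCell {n : Nat} {t : List (List Int)} (h : pvShape n t)
    {a b x y : Nat} (ha : a < n) (hb : b < n) (hx : x < n) (hy : y < n) (v : Int) :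
    pvGet2 (pvSetCell t a b v) x y = if x = a ∧ y = b then v else pvGet2 t x y := by
  obtain ⟨h1, h2⟩ := h
  have hat : a < t.length := by omega
  have hxt : x < t.length := by omega
  have hrowx : (t[x]'hxt).length = n := h2 x hxt
  by_cases hxa : x = a
  · subst hxa
    have hrw : (pvSetCell t x b v).getD x [] = (t[x]'hxt).set b v := by
      simp [pvSetCell, List.getD_eq_getElem?_getD,
        List.getElem?_eq_getElem hxt]
    rw [pvGet2, hrw]
    by_cases hyb : y = b
    · subst hyb
      simp [List.getD_eq_getElem?_getD,
        List.getElem?_set_self (by omega : y < (t[x]'hxt).length)]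
    · simp [pvGet2, List.getD_eq_getElem?_getD,
        show ¬ b = y from fun hh => hyb hh.symm, hyb,
        List.getElem?_eq_getElem hxt]
  · have hne : ¬ a = x := fun hh => hxa hh.symm
    simp [pvGet2, pvSetCell, List.getD_eq_getElem?_getD, hne, hxa]

-- loop body of A's inner loop over node2, with node1 = k fixed
def pvBody (i : List (List Int)) (k : Nat) (t : List (List Int)) (node2 : Nat) : List (List Int) :=
  if k = node2 then t
  else pvSetCell (pvSetCell t k node2 (pvRowSum i k * pvRowSum i node2)) node2 k
    (pvRowSum i k * pvRowSum i node2)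

-- invariant after the inner loop has processed node2 = 0..j-1 (node1 = k)
def pvInnerP (i : List (List Int)) (k j : Nat) (t : List (List Int)) : Prop :=
  pvShape i.length t ∧ ∀ x y : Nat, x < i.length → y < i.length →
    pvGet2 t x y = if x = y then 0
      else if x < k ∨ y < k ∨ (x = k ∧ y < j) ∨ (y = k ∧ x < j) then pvEnt i x y else 0

-- invariant after the outer loop has processed node1 = 0..k-1
def pvOuterP (i : List (List Int)) (k : Nat) (t : List (List Int)) : Prop :=
  pvShape i.length t ∧ ∀ x y : Nat, x < i.length → y < i.length →
    pvGet2 t x y = if x = y then 0 else if x < k ∨ y < k then pvEnt i x y else 0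

theorem pvInner_step (i : List (List Int)) (k j : Nat) (hk : k < i.length)
    (hj : j < i.length) (t : List (List Int)) (h : pvInnerP i k j t) :
    pvInnerP i k (j + 1) (pvBody i k t j) := by
  obtain ⟨hsh, hinv⟩ := h
  by_cases hkj : k = j
  · refine ⟨by simpa [pvBody, hkj] using hsh, ?_⟩
    intro x y hx hy
    rw [pvBody, if_pos hkj, hinv x y hx hy]
    by_cases hxy : x = y
    · simp [hxy]
    · rw [if_neg hxy, if_neg hxy]
      have : (x < k ∨ y < k ∨ (x = k ∧ y < j) ∨ (y = k ∧ x < j)) ↔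
          (x < k ∨ y < k ∨ (x = k ∧ y < j + 1) ∨ (y = k ∧ x < j + 1)) := by omega
      rw [show (if x < k ∨ y < k ∨ (x = k ∧ y < j) ∨ (y = k ∧ x < j) then pvEnt i x y else 0)
          = (if x < k ∨ y < k ∨ (x = k ∧ y < j + 1) ∨ (y = k ∧ x < j + 1) then pvEnt i x y else 0)
          from by rw [if_congr this rfl rfl]]
  · have hsh1 : pvShape i.length (pvSetCell t k j (pvRowSum i k * pvRowSum i j)) :=
      pvShape_setCell hsh _ _ _
    refine ⟨by simpa [pvBody, hkj] using pvShape_setCell hsh1 _ _ _, ?_⟩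
    intro x y hx hy
    rw [pvBody, if_neg hkj, pvGet2_setCell hsh1 hj hk hx hy,
      pvGet2_setCell hsh hk hj hx hy, hinv x y hx hy]
    by_cases h1 : x = j ∧ y = k
    · rw [if_pos h1, if_neg (by omega : ¬ x = y), if_pos (by omega)]
      obtain ⟨rfl, rfl⟩ := h1
      rw [pvEnt, if_neg (fun hh => hkj (Eq.symm hh))]
      exact mul_comm _ _
    · rw [if_neg h1]
      by_cases h2 : x = k ∧ y = j
      · rw [if_pos h2, if_neg (by omega : ¬ x = y), if_pos (by omega)]
        obtain ⟨rfl, rfl⟩ := h2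
        rw [pvEnt, if_neg hkj]
      · rw [if_neg h2]
        by_cases hxy : x = y
        · simp [hxy]
        · rw [if_neg hxy, if_neg hxy,
            if_congr (show (x < k ∨ y < k ∨ (x = k ∧ y < j) ∨ (y = k ∧ x < j)) ↔
              (x < k ∨ y < k ∨ (x = k ∧ y < j + 1) ∨ (y = k ∧ x < j + 1)) from by omega) rfl rfl]

theorem pvInner_fold (i : List (List Int)) (k : Nat) (hk : k < i.length) :
    ∀ (m j : Nat) (t : List (List Int)), j + m ≤ i.length → pvInnerP i k j t →
      pvInnerP i k (j + m) ((List.range' j m).foldl (pvBody i k) t) := by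
  intro m
  induction m with
  | zero => intro j t _ h; simpa using h
  | succ m ih =>
    intro j t hle h
    rw [List.range'_succ, List.foldl_cons]
    have := ih (j + 1) (pvBody i k t j) (by omega)
      (pvInner_step i k j hk (by omega) t h)
    simpa [Nat.add_assoc, Nat.add_comm 1 m] using this

theorem pvOuter_step (i : List (List Int)) (k : Nat) (hk : k < i.length)
    (t : List (List Int)) (h : pvOuterP i k t) :
    pvOuterP i (k + 1) ((List.range i.length).foldl (pvBody i k) t) := by
  have h0 : pvInnerP i k 0 t := by
    obtain ⟨hsh, hinv⟩ := h
    refine ⟨hsh, ?_⟩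
    intro x y hx hy
    rw [hinv x y hx hy]
    by_cases hxy : x = y
    · simp [hxy]
    · rw [if_neg hxy, if_neg hxy,
        if_congr (show (x < k ∨ y < k) ↔
          (x < k ∨ y < k ∨ (x = k ∧ y < 0) ∨ (y = k ∧ x < 0)) from by omega) rfl rfl]
  have := pvInner_fold i k hk i.length 0 t (by omega) h0
  rw [List.range_eq_range']
  obtain ⟨hsh, hinv⟩ := this
  refine ⟨hsh, ?_⟩
  intro x y hx hy
  rw [hinv x y hx hy]
  by_cases hxy : x = y
  · simp [hxy]
  · rw [if_neg hxy, if_neg hxy,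
      if_congr (show (x < k ∨ y < k ∨ (x = k ∧ y < 0 + i.length) ∨ (y = k ∧ x < 0 + i.length)) ↔
        (x < k + 1 ∨ y < k + 1) from by omega) rfl rfl]

theorem pvOuter_fold (i : List (List Int)) :
    ∀ (m j : Nat) (t : List (List Int)), j + m ≤ i.length → pvOuterP i j t →
      pvOuterP i (j + m) ((List.range' j m).foldl
        (fun t node1 => (List.range i.length).foldl (pvBody i node1) t) t) := by
  intro m
  induction m with
  | zero => intro j t _ h; simpa using h
  | succ m ih =>
    intro j t hle h
    rw [List.range'_succ, List.foldl_cons]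
    have := ih (j + 1) _ (by omega) (pvOuter_step i j (by omega) t h)
    simpa [Nat.add_assoc, Nat.add_comm 1 m] using this

theorem pvInit_outer (i : List (List Int)) :
    pvOuterP i 0 ((List.range i.length).map
      (fun _ => (List.range i.length).map (fun _ => (0 : Int)))) := by
  constructor
  · constructor
    · simp
    · intro j hj
      simp
  · intro x y hx hy
    have hx' : x < ((List.range i.length).map
        (fun _ => (List.range i.length).map (fun _ => (0 : Int)))).length := by simpa using hx
    rw [pvGet2, pvGetD_eq hx']
    simp only [List.getElem_map]
    have hy' : y < ((List.range i.length).map (fun _ => (0 : Int))).length := by simpa using hy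
    rw [pvGetD_eq hy']
    simp [hy]

theorem Spa_one_eq (i : List (List Int)) : pvSpaOne i = pvSpaAltOne i := by
  have hfold := pvOuter_fold i i.length 0 _ (by omega) (pvInit_outer i)
  rw [← List.range_eq_range'] at hfold
  obtain ⟨⟨hlen, hrow⟩, hinv⟩ := hfold
  have hgoal : pvSpaOne i = (List.range i.length).foldl
      (fun t node1 => (List.range i.length).foldl (pvBody i node1) t)
      ((List.range i.length).map (fun _ => (List.range i.length).map (fun _ => (0 : Int)))) := by
    rfl
  rw [hgoal]
  set T := (List.range i.length).foldl
      (fun t node1 => (List.range i.length).foldl (pvBody i node1) t)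
      ((List.range i.length).map (fun _ => (List.range i.length).map (fun _ => (0 : Int)))) with hT
  apply List.ext_getElem
  · simp [pvSpaAltOne, hlen]
  · intro a h1 h2
    have ha : a < i.length := by omega
    apply List.ext_getElem
    · have := hrow a h1
      simp [pvSpaAltOne, this, ha]
    · intro b h3 h4
      have hb : b < i.length := by
        have := hrow a h1; omega
      have hget : T[a][b] = pvGet2 T a b := by
        rw [pvGet2, pvGetD_eq h1, pvGetD_eq h3]
      rw [hget, hinv a b ha hb]
      simp only [pvSpaAltOne, List.getElem_map, List.getElem_range]
      have hsa : (i.map List.sum).getD a 0 = pvRowSum i a := by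
        rw [pvGetD_eq (by simpa using ha), List.getElem_map, pvRowSum, pvGetD_eq ha]
      have hsb : (i.map List.sum).getD b 0 = pvRowSum i b := by
        rw [pvGetD_eq (by simpa using hb), List.getElem_map, pvRowSum, pvGetD_eq hb]
      by_cases hab : a = b
      · simp [hab]
      · rw [if_neg hab, if_neg hab, if_pos (by omega : a < 0 + i.length ∨ b < 0 + i.length),
          pvEnt, if_neg hab, hsa, hsb]

theorem Spa_eq_fold (matrices : List (List (List Int))) :
    Spa matrices = Spa_alt matrices := by
  have : ∀ (acc : List (List (List Int))),
      matrices.foldl (fun acc i => acc ++ [pvSpaOne i]) acc = acc ++ matrices.map pvSpaAltOne := by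
    induction matrices with
    | nil => intro acc; simp
    | cons m ms ih => intro acc; simp [List.foldl_cons, ih, Spa_one_eq m]
  simpa [Spa, Spa_alt] using this []

-- ===== VERDICT (by name: the statement is the Claim_ definition above) =====
theorem Spa_spec : Claim_equal_Spa := by
  intro matrices _
  unfold Spec_Spa
  exact Spa_eq_fold matrices
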